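-- pv_equiv track=rewrite | github.com/Julius-Ed/Problem-Solving | encrypted_words.py | encrypted_words
-- ===== SOURCE A (Python) =====
-- def encrypted_words(S):
--
--
--     R = ""
--
--     if len(S) % 2 != 0:
--         middle = len(S) // 2
--     else:
--         middle = (len(S) // 2) - 1
--
--     R += S[middle]
--
--     left = S[:middle]
--     right = S[middle +1:]
--
--     if middle > 0:
--         R += encrypted_words(left)
--
--     if middle < len(S) - 1:
--         R += encrypted_words(right)
--
--     return R
-- ===== SOURCE B (Python) =====
-- def encrypted_words(S):
--     # Iterative pre-order over (lo, hi) index ranges with an explicit stack,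
--     # instead of recursing on sliced copies of the string.
--     result = []
--     stack = [(0, len(S))]
--     while stack:
--         lo, hi = stack.pop()
--         L = hi - lo
--         middle = L // 2 if L % 2 != 0 else L // 2 - 1
--         result.append(S[lo + middle])
--         if lo + middle + 1 < hi:          # right part non-empty
--             stack.append((lo + middle + 1, hi))
--         if middle > 0:                    # left part non-empty
--             stack.append((lo, lo + middle))
--     return "".join(result)
-- ===== Notes on version B (the rewrite author's own statement) =====
-- stated objective: alternative
-- what changed: Replaces the recursion that slices out left/right substring copies at each level with a single iterative loop over an explicit stack of (lo, hi) index ranges into the original string, appending characters to a result list joined once at the end.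
import Mathlib
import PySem

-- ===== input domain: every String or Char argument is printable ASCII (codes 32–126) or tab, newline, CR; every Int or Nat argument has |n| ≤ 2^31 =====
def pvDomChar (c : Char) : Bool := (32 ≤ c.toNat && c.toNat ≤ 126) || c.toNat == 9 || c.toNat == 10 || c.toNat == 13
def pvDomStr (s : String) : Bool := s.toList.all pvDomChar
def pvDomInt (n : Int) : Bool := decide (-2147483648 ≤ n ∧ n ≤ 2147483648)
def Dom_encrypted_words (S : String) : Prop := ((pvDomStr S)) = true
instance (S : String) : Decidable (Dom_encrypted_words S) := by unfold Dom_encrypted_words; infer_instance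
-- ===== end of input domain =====

-- B replaces A's slice-and-recurse scheme by a single iterative loop over an explicit
-- stack of (lo, hi) index ranges into the original string (alternative decomposition).


-- ===== PORT A =====
-- the middle index both Pythons compute: len//2 if the length is odd, else len//2 - 1
def pyMiddle (n : Int) : Int :=
  if PySem.Int.mod n 2 ≠ 0 then PySem.Int.floordiv n 2 else PySem.Int.floordiv n 2 - 1

-- bounds on pyMiddle, cited by the A-port's decreasing_by (and reused in the proofs below)
theorem pyMiddle_bounds (n : Int) (h : 0 ≤ n) :
    -1 ≤ pyMiddle n ∧ (1 ≤ n → 0 ≤ pyMiddle n ∧ pyMiddle n < n) := by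
  unfold pyMiddle
  rw [PySem.Int.mod_eq_emod_of_pos (a := n) (by norm_num),
      PySem.Int.floordiv_eq_ediv_of_pos (a := n) (by norm_num)]
  split_ifs <;> omega

-- A's recursion on the character list; pyGetD's default is reachable only for the empty
-- string (where Python raises IndexError — excluded by Pre_), slices are PySem slices
def encAux (s : List Char) : List Char :=
  ([PySem.List.pyGetD s (pyMiddle (PySem.List.len s)) '!'] ++
    (if pyMiddle (PySem.List.len s) > 0 then
        encAux (PySem.List.slice s (some 0) (some (pyMiddle (PySem.List.len s)))) else [])) ++
  (if pyMiddle (PySem.List.len s) < PySem.List.len s - 1 then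
      encAux (PySem.List.slice s (some (pyMiddle (PySem.List.len s) + 1)) none) else [])
termination_by s.length
decreasing_by
  · simp only [PySem.List.len_eq] at *
    have hguard : pyMiddle (s.length : Int) > 0 := by assumption
    have hlen1 : 1 ≤ s.length := by
      rcases Nat.eq_zero_or_pos s.length with h | h
      · rw [h] at hguard; push_cast at hguard
        rw [show pyMiddle 0 = -1 from by decide] at hguard; omega
      · omega
    have hb := pyMiddle_bounds ((s.length : Int)) (by omega)
    have hmn : pyMiddle (s.length : Int) < (s.length : Int) := by
      rcases hb with ⟨h1, h2⟩; exact (h2 (by omega)).2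
    rw [PySem.List.slice_zero_start,
        show (pyMiddle (s.length : Int)) = (((pyMiddle (s.length : Int)).toNat : Nat) : Int) by omega,
        PySem.List.slice_to_natCast]
    simp only [List.length_take]
    omega
  · simp only [PySem.List.len_eq] at *
    have hguard : pyMiddle (s.length : Int) < (s.length : Int) - 1 := by assumption
    have hb := pyMiddle_bounds ((s.length : Int)) (by omega)
    have hlen1 : 1 ≤ s.length := by rcases hb with ⟨h1, h2⟩; omega
    have h0 : 0 ≤ pyMiddle (s.length : Int) := by
      rcases hb with ⟨h1, h2⟩; exact (h2 (by omega)).1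
    rw [show (pyMiddle (s.length : Int) + 1) = (((pyMiddle (s.length : Int) + 1).toNat : Nat) : Int) by omega,
        PySem.List.slice_from_natCast]
    simp only [List.length_drop]
    omega

def encrypted_words (S : String) : String := String.ofList (encAux S.toList)

-- ===== PORT B =====
-- head of the list = top of the Python stack (push = cons, pop = take the head);
-- fuel = |S| + 1 bounds the loop: each iteration emits exactly one character
def loopB (s : List Char) : Nat → List (Int × Int) → List Char → List Char
  | _, [], acc => acc
  | 0, _ :: _, acc => acc
  | fuel + 1, (lo, hi) :: rest, acc =>
      loopB s fuel
        (if pyMiddle (hi - lo) > 0 then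
          (lo, lo + pyMiddle (hi - lo)) ::
            (if lo + pyMiddle (hi - lo) + 1 < hi then (lo + pyMiddle (hi - lo) + 1, hi) :: rest else rest)
        else
          (if lo + pyMiddle (hi - lo) + 1 < hi then (lo + pyMiddle (hi - lo) + 1, hi) :: rest else rest))
        (acc ++ [PySem.List.pyGetD s (lo + pyMiddle (hi - lo)) '!'])

def encrypted_words_alt (S : String) : String :=
  String.ofList (loopB S.toList (S.toList.length + 1) [(0, PySem.List.len S.toList)] [])

-- ===== PRECONDITION & SPEC =====
-- Pre_ excludes only the empty string, on which the Python A raises IndexError (S[-1] on "")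
def Pre_encrypted_words (S : String) : Prop := S ≠ ""
instance (S : String) : Decidable (Pre_encrypted_words S) := by unfold Pre_encrypted_words; infer_instance
def pvWitness_encrypted_words : String := "abcdefg"

def Spec_encrypted_words (S : String) (out : String) : Prop := out = encrypted_words_alt S
instance (S : String) (out : String) : Decidable (Spec_encrypted_words S out) := by unfold Spec_encrypted_words; infer_instance

-- ===== CLAIM (what is proved, stated in full; the proofs are below) =====
def Claim_equal_encrypted_words : Prop := ∀ (S : String), Dom_encrypted_words S → Pre_encrypted_words S → Spec_encrypted_words S (encrypted_words S)

-- ===== LEMMAS AND PROOFS =====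

/-- the contiguous segment `s[lo:hi]` for `0 ≤ lo ≤ hi ≤ |s|` -/
def seg (s : List Char) (lo hi : Int) : List Char := (s.drop lo.toNat).take (hi - lo).toNat

theorem length_seg (s : List Char) (lo hi : Int) (h0 : 0 ≤ lo) (hlh : lo ≤ hi)
    (hle : hi ≤ (s.length : Int)) : ((seg s lo hi).length : Int) = hi - lo := by
  simp [seg]; omega

/-- unfolding of the A-recursion on a segment, phrased with the expressions B's loop uses -/
theorem encAux_seg (s : List Char) (lo hi : Int) (h0 : 0 ≤ lo) (hlt : lo < hi)
    (hle : hi ≤ (s.length : Int)) :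
    encAux (seg s lo hi) =
      [PySem.List.pyGetD s (lo + pyMiddle (hi - lo)) '!'] ++
      (if pyMiddle (hi - lo) > 0 then encAux (seg s lo (lo + pyMiddle (hi - lo))) else []) ++
      (if pyMiddle (hi - lo) < hi - lo - 1 then encAux (seg s (lo + pyMiddle (hi - lo) + 1) hi) else []) := by
  have hlen : ((seg s lo hi).length : Int) = hi - lo := length_seg s lo hi h0 (le_of_lt hlt) hle
  have hb := pyMiddle_bounds (hi - lo) (by omega)
  have hm0 : 0 ≤ pyMiddle (hi - lo) := (hb.2 (by omega)).1
  have hmlt : pyMiddle (hi - lo) < hi - lo := (hb.2 (by omega)).2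
  have hchar : PySem.List.pyGetD (seg s lo hi) (pyMiddle (hi - lo)) '!'
      = PySem.List.pyGetD s (lo + pyMiddle (hi - lo)) '!' := by
    rw [PySem.List.pyGetD_eq_getElem (seg s lo hi) '!' hm0 (by rw [hlen]; omega),
        PySem.List.pyGetD_eq_getElem s '!' (by omega) (by omega)]
    simp only [seg]
    rw [List.getElem_take, List.getElem_drop]
    congr 1
    omega
  have hL : PySem.List.slice (seg s lo hi) (some 0) (some (pyMiddle (hi - lo)))
      = seg s lo (lo + pyMiddle (hi - lo)) := by
    rw [PySem.List.slice_zero_start,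
        show pyMiddle (hi - lo) = (((pyMiddle (hi - lo)).toNat : Nat) : Int) by omega,
        PySem.List.slice_to_natCast]
    simp only [seg, List.take_take]
    congr 1
    omega
  have hR : PySem.List.slice (seg s lo hi) (some (pyMiddle (hi - lo) + 1)) none
      = seg s (lo + pyMiddle (hi - lo) + 1) hi := by
    rw [show pyMiddle (hi - lo) + 1 = (((pyMiddle (hi - lo) + 1).toNat : Nat) : Int) by omega,
        PySem.List.slice_from_natCast]
    simp only [seg, List.drop_take, List.drop_drop]
    congr 1
    · omega
    · congr 1
      omega
  rw [encAux]
  simp only [PySem.List.len_eq, hlen, hchar, hL, hR]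

/-- B's stack loop computes, after `acc`, the concatenation of the A-recursion over the
    stacked ranges in stack order, given enough fuel (the sum of the range lengths). -/
theorem loopB_spec (s : List Char) (fuel : Nat) :
    ∀ (stack : List (Int × Int)) (acc : List Char),
      (∀ r ∈ stack, 0 ≤ r.1 ∧ r.1 < r.2 ∧ r.2 ≤ (s.length : Int)) →
      (stack.map (fun r => r.2 - r.1)).sum ≤ (fuel : Int) →
      loopB s fuel stack acc = acc ++ (stack.map (fun r => encAux (seg s r.1 r.2))).flatten := by
  induction fuel with
  | zero =>
      intro stack acc hok hsum
      cases stack with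
      | nil => simp [loopB]
      | cons r rest =>
          exfalso
          have h1 := hok r (by simp)
          have h2 : (0:Int) ≤ (rest.map (fun r => r.2 - r.1)).sum := by
            apply List.sum_nonneg
            intro x hx
            simp only [List.mem_map] at hx
            obtain ⟨r', hr', rfl⟩ := hx
            have := hok r' (List.mem_cons_of_mem _ hr')
            omega
          simp only [List.map_cons, List.sum_cons] at hsum
          omega
  | succ fuel ih =>
      intro stack acc hok hsum
      cases stack with
      | nil => simp [loopB]
      | cons r rest =>
          obtain ⟨lo, hi⟩ := r
          have hr := hok (lo, hi) (by simp)
          simp only at hr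
          obtain ⟨h0, hlt, hle⟩ := hr
          have hb := pyMiddle_bounds (hi - lo) (by omega)
          have hm0 : 0 ≤ pyMiddle (hi - lo) := (hb.2 (by omega)).1
          have hmlt : pyMiddle (hi - lo) < hi - lo := (hb.2 (by omega)).2
          have hrest : ∀ r ∈ rest, 0 ≤ r.1 ∧ r.1 < r.2 ∧ r.2 ≤ (s.length : Int) :=
            fun r hr => hok r (List.mem_cons_of_mem _ hr)
          have hsum0 : (0:Int) ≤ (rest.map (fun r => r.2 - r.1)).sum := by
            apply List.sum_nonneg
            intro x hx
            simp only [List.mem_map] at hx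
            obtain ⟨r', hr', rfl⟩ := hx
            have := hrest r' hr'
            omega
          simp only [List.map_cons, List.sum_cons] at hsum
          rw [loopB]
          simp only [List.map_cons, List.flatten_cons]
          rw [encAux_seg s lo hi h0 hlt hle]
          set m := pyMiddle (hi - lo) with hmdef
          simp only [show (m < hi - lo - 1) ↔ (lo + m + 1 < hi) from by omega]
          split_ifs with hgl hgr hgr
          · rw [ih ((lo, lo + m) :: (lo + m + 1, hi) :: rest) _
                (by
                  intro r hr
                  rcases List.mem_cons.mp hr with h | h
                  · subst h; exact ⟨h0, by omega, by omega⟩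
                  rcases List.mem_cons.mp h with h' | h'
                  · subst h'; exact ⟨by omega, by omega, hle⟩
                  · exact hrest r h')
                (by
                  simp only [List.map_cons, List.sum_cons]
                  push_cast at hsum ⊢
                  omega)]
            simp only [List.map_cons, List.flatten_cons]
            simp [List.append_assoc]
          · rw [ih ((lo, lo + m) :: rest) _
                (by
                  intro r hr
                  rcases List.mem_cons.mp hr with h | h
                  · subst h; exact ⟨h0, by omega, by omega⟩
                  · exact hrest r h)
                (by
                  simp only [List.map_cons, List.sum_cons]
                  push_cast at hsum ⊢
                  omega)]
            simp only [List.map_cons, List.flatten_cons]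
            simp [List.append_assoc]
          · rw [ih ((lo + m + 1, hi) :: rest) _
                (by
                  intro r hr
                  rcases List.mem_cons.mp hr with h | h
                  · subst h; exact ⟨by omega, by omega, hle⟩
                  · exact hrest r h)
                (by
                  simp only [List.map_cons, List.sum_cons]
                  push_cast at hsum ⊢
                  omega)]
            simp only [List.map_cons, List.flatten_cons]
            simp [List.append_assoc]
          · rw [ih rest _ hrest
                (by push_cast at hsum ⊢; omega)]
            simp [List.append_assoc]

theorem loopB_full (s : List Char) (hne : s ≠ []) :
    loopB s (s.length + 1) [(0, (s.length : Int))] [] = encAux s := by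
  have hlen : 1 ≤ s.length := List.length_pos_iff.mpr hne
  rw [loopB_spec s (s.length + 1) [(0, (s.length : Int))] []
      (by
        intro r hr
        simp only [List.mem_singleton] at hr
        subst hr
        refine ⟨le_refl 0, by omega, le_refl _⟩)
      (by simp)]
  simp [seg]

-- ===== VERDICT (by name: the statement is the Claim_ definition above) =====
theorem encrypted_words_spec : Claim_equal_encrypted_words := by
  intro S _ hpre
  unfold Spec_encrypted_words encrypted_words encrypted_words_alt
  have hne : S.toList ≠ [] := by
    intro h; apply hpre; cases S; simp_all
  rw [show PySem.List.len S.toList = ((S.toList.length : Nat) : Int) from by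
        simp [PySem.List.len_eq],
      loopB_full S.toList hne]
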